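-- pv_equiv track=rewrite | github.com/vaidik627/major_web_scraper | backend/services/advanced_analytics.py | _select_contextual_sentences
-- ===== SOURCE A (Python) =====
-- from typing import Dict, List, Any, Optional
--
-- def _select_contextual_sentences(sentences: List[str], keywords: List[str], count: int) -> List[str]:
--     """Select sentences that provide context and background."""
--     scored_sentences = []
--
--     for sentence in sentences:
--         score = 0
--         sentence_lower = sentence.lower()
--
--         # Score based on contextual indicators
--         context_indicators = ["background", "context", "overview", "introduction", "purpose", "objective"]
--         for indicator in context_indicators:
--             if indicator in sentence_lower:
--                 score += 2
--
--         # Score based on keyword presence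
--         for keyword in keywords[:5]:
--             if keyword.lower() in sentence_lower:
--                 score += 1
--
--         # Prefer longer, informative sentences
--         if 15 <= len(sentence.split()) <= 40:
--             score += 1
--
--         scored_sentences.append((sentence, score))
--
--     # Sort by score and return top sentences
--     scored_sentences.sort(key=lambda x: x[1], reverse=True)
--     return [sent[0] for sent in scored_sentences[:count]]
-- ===== SOURCE B (Python) =====
-- from typing import List
--
-- _CONTEXT_INDICATORS = ["background", "context", "overview", "introduction", "purpose", "objective"]
--
--
-- def _context_score(sentence: str, keywords: List[str]) -> int:
--     sentence_lower = sentence.lower()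
--     score = 2 * sum(ind in sentence_lower for ind in _CONTEXT_INDICATORS)
--     score += sum(kw.lower() in sentence_lower for kw in keywords[:5])
--     if 15 <= len(sentence.split()) <= 40:
--         score += 1
--     return score
--
--
-- def _select_contextual_sentences(sentences: List[str], keywords: List[str], count: int) -> List[str]:
--     # Scores are bounded integers in 0..18, so bucket by score instead of sorting:
--     # appending keeps original order inside each bucket, and reading the buckets from
--     # the highest score down reproduces the stable reverse sort exactly.
--     buckets = [[] for _ in range(19)]
--     for sentence in sentences:
--         buckets[_context_score(sentence, keywords)].append(sentence)
--     result = []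
--     for bucket in reversed(buckets):
--         result.extend(bucket)
--     return result[:count]
-- ===== Notes on version B (the rewrite author's own statement) =====
-- stated objective: alternative
-- what changed: B replaces A's collect-(sentence,score)-pairs-then-stable-reverse-sort with counting-sort-style buckets: scores are bounded integers 0..18, each sentence is appended to buckets[score] in one pass, and the buckets are concatenated from the highest score down before taking the first count items.
import Mathlib
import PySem

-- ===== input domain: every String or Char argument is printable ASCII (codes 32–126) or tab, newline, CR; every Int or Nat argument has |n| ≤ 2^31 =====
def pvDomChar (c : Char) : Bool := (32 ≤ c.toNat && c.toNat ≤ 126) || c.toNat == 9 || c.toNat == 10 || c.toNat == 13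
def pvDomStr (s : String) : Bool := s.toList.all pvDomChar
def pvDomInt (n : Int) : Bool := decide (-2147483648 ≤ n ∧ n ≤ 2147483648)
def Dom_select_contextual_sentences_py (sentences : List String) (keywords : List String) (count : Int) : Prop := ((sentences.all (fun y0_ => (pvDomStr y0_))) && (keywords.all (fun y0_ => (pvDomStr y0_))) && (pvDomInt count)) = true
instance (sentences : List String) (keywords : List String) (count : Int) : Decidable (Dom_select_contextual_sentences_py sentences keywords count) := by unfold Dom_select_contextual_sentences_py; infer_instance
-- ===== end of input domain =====

-- B replaces A's build-pairs-then-stable-reverse-sort by score buckets (scores are bounded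
-- integers 0..18) emitted from the highest score down; objective: alternative (no sort).

-- ===== PORT A =====
def ctxIndicators : List String :=
  ["background", "context", "overview", "introduction", "purpose", "objective"]

def select_contextual_sentences_py (sentences : List String) (keywords : List String) (count : Int) : List String :=
  let scored_sentences : List (String × Int) :=
    sentences.foldl (fun acc sentence =>
      let sentence_lower := PySem.Str.lower sentence
      let score : Int := 0
      let score := ctxIndicators.foldl
        (fun sc indicator => if PySem.Str.isIn indicator sentence_lower then sc + 2 else sc) score
      let score := (PySem.List.slice keywords none (some 5)).foldl
        (fun sc keyword => if PySem.Str.isIn (PySem.Str.lower keyword) sentence_lower then sc + 1 else sc) score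
      let score := if 15 ≤ (PySem.Str.split₀ sentence).length ∧ (PySem.Str.split₀ sentence).length ≤ 40
        then score + 1 else score
      acc ++ [(sentence, score)]) []
  let scored_sentences := PySem.List.sorted scored_sentences (fun x => x.2) true
  (PySem.List.slice scored_sentences none (some count)).map (fun sent => sent.1)

-- ===== PORT B =====
def ctxIndicatorsB : List String :=
  ["background", "context", "overview", "introduction", "purpose", "objective"]

def ctxScore (sentence : String) (keywords : List String) : Int :=
  let sentence_lower := PySem.Str.lower sentence
  let score : Int :=
    2 * (ctxIndicatorsB.countP (fun ind => PySem.Str.isIn ind sentence_lower) : Int)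
  let score := score +
    ((PySem.List.slice keywords none (some 5)).countP
      (fun kw => PySem.Str.isIn (PySem.Str.lower kw) sentence_lower) : Int)
  if 15 ≤ (PySem.Str.split₀ sentence).length ∧ (PySem.Str.split₀ sentence).length ≤ 40
    then score + 1 else score

def bucketAdd (bs : List (List String)) (i : Nat) (x : String) : List (List String) :=
  bs.set i (bs.getD i [] ++ [x])

def select_contextual_sentences_py_alt (sentences : List String) (keywords : List String) (count : Int) : List String :=
  let buckets := sentences.foldl
    (fun bs sentence => bucketAdd bs (ctxScore sentence keywords).toNat sentence)
    (List.replicate 19 [])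
  let result := buckets.reverse.foldl (fun acc bucket => acc ++ bucket) []
  PySem.List.slice result none (some count)

-- ===== PRECONDITION & SPEC =====
def Spec_select_contextual_sentences_py (sentences : List String) (keywords : List String) (count : Int) (out : List String) : Prop := out = select_contextual_sentences_py_alt sentences keywords count
instance (sentences : List String) (keywords : List String) (count : Int) (out : List String) : Decidable (Spec_select_contextual_sentences_py sentences keywords count out) := by unfold Spec_select_contextual_sentences_py; infer_instance

-- ===== CLAIM (what is proved, stated in full; the proofs are below) =====
def Claim_equal_select_contextual_sentences_py : Prop := ∀ (sentences : List String) (keywords : List String) (count : Int), Dom_select_contextual_sentences_py sentences keywords count → Spec_select_contextual_sentences_py sentences keywords count (select_contextual_sentences_py sentences keywords count)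

-- ===== LEMMAS AND PROOFS =====

-- A's per-sentence score (the let-chain of A's loops) equals B's ctxScore.
lemma sum_map_ite_two {α : Type} (p : α → Bool) (l : List α) :
    (l.map (fun x => if p x then (2:Int) else 0)).sum = 2 * (l.countP p : Int) := by
  induction l with
  | nil => simp
  | cons a l ih =>
    by_cases h : p a
    · simp [h, ih]; ring
    · simp [h, ih]

lemma score_eq (sentence : String) (keywords : List String) :
    (if 15 ≤ (PySem.Str.split₀ sentence).length ∧ (PySem.Str.split₀ sentence).length ≤ 40
      then (PySem.List.slice keywords none (some 5)).foldl
            (fun sc keyword => if PySem.Str.isIn (PySem.Str.lower keyword) (PySem.Str.lower sentence) then sc + 1 else sc)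
            (ctxIndicators.foldl
              (fun sc indicator => if PySem.Str.isIn indicator (PySem.Str.lower sentence) then sc + 2 else sc) 0) + 1
      else (PySem.List.slice keywords none (some 5)).foldl
            (fun sc keyword => if PySem.Str.isIn (PySem.Str.lower keyword) (PySem.Str.lower sentence) then sc + 1 else sc)
            (ctxIndicators.foldl
              (fun sc indicator => if PySem.Str.isIn indicator (PySem.Str.lower sentence) then sc + 2 else sc) 0))
    = ctxScore sentence keywords := by
  simp only [ctxScore, ctxIndicators, ctxIndicatorsB]
  have hcore : (PySem.List.slice keywords none (some 5)).foldl
      (fun sc keyword => if PySem.Str.isIn (PySem.Str.lower keyword) (PySem.Str.lower sentence) then sc + 1 else sc)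
      ((["background", "context", "overview", "introduction", "purpose", "objective"] : List String).foldl
        (fun sc indicator => if PySem.Str.isIn indicator (PySem.Str.lower sentence) then sc + 2 else sc) 0)
      = 2 * ((["background", "context", "overview", "introduction", "purpose", "objective"] : List String).countP
              (fun ind => PySem.Str.isIn ind (PySem.Str.lower sentence)) : Int)
        + ((PySem.List.slice keywords none (some 5)).countP
              (fun kw => PySem.Str.isIn (PySem.Str.lower kw) (PySem.Str.lower sentence)) : Int) := by
    rw [PySem.List.foldl_if_add_one]
    rw [PySem.List.foldl_congr_mem _ _
          (fun sc indicator => sc + (if PySem.Str.isIn indicator (PySem.Str.lower sentence) then (2:Int) else 0)) _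
          (by intro acc x _; dsimp only; split_ifs <;> omega)]
    rw [PySem.List.foldl_add, sum_map_ite_two]
    ring
  rw [hcore]

-- unfolding equations for PySem.List.insertBy
lemma insertBy_cons {α : Type} (before : α → α → Bool) (x y : α) (ys : List α) :
    PySem.List.insertBy before x (y :: ys)
      = if before x y then x :: y :: ys else y :: PySem.List.insertBy before x ys := rfl

-- insertBy skips a prefix it does not go before
lemma insertBy_append_not {α : Type} (before : α → α → Bool) (x : α) (as bs : List α)
    (h : ∀ y ∈ as, before x y = false) :
    PySem.List.insertBy before x (as ++ bs) = as ++ PySem.List.insertBy before x bs := by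
  induction as with
  | nil => simp
  | cons a as ih =>
    rw [List.cons_append, insertBy_cons, h a (by simp), if_neg (by simp)]
    rw [ih (fun y hy => h y (by simp [hy]))]
    rfl

lemma insertBy_all_before {α : Type} (before : α → α → Bool) (x : α) (rest : List α)
    (h : ∀ y ∈ rest, before x y = true) :
    PySem.List.insertBy before x rest = x :: rest := by
  cases rest with
  | nil => rfl
  | cons y ys => rw [insertBy_cons, if_pos (h y (by simp))]

-- inserting x into a descending-score bucket concatenation appends it to its bucket
lemma ins_flatMap {α : Type} (key : α → Int) (x : α) (S : List Int)
    (hS : S.Pairwise (fun a b => b < a)) (hx : key x ∈ S) (xs : List α) :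
    PySem.List.insertBy (fun a b => decide (key b < key a)) x
        (S.flatMap (fun v => xs.filter (fun y => key y == v)))
      = S.flatMap (fun v => (xs ++ [x]).filter (fun y => key y == v)) := by
  induction S with
  | nil => cases hx
  | cons v S' ih =>
    have htail : ∀ w ∈ S', w < v := by
      intro w hw; exact (List.pairwise_cons.mp hS).1 w hw
    have hxle : key x ≤ v := by
      rcases List.mem_cons.mp hx with h | h
      · omega
      · exact le_of_lt (htail _ h)
    simp only [List.flatMap_cons]
    rw [insertBy_append_not _ _ _ _ (by
      intro y hy
      have hk : key y = v := by
        have := List.of_mem_filter hy; simpa using this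
      simp [hk]; omega)]
    rw [List.filter_append]
    by_cases hv : key x = v
    · rw [insertBy_all_before _ _ _ (by
        intro y hy
        rcases List.mem_flatMap.mp hy with ⟨w, hw, hyw⟩
        have hkey : key y = w := by
          have := List.of_mem_filter hyw; simpa using this
        have : w < v := htail _ hw
        simp [hkey]; omega)]
      have hbuckets : S'.flatMap (fun w => (xs ++ [x]).filter (fun y => key y == w))
          = S'.flatMap (fun w => xs.filter (fun y => key y == w)) := by
        apply List.flatMap_congr
        intro w hw
        rw [List.filter_append]
        have hwv : w < v := htail _ hw
        have hne : key x ≠ w := by omega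
        simp [hne]
      rw [hbuckets]
      have hxv : (([x] : List α).filter (fun y => key y == v)) = [x] := by
        simp [hv]
      simp [hxv]
    · have hxS' : key x ∈ S' := by
        rcases List.mem_cons.mp hx with h | h
        · exact absurd h hv
        · exact h
      have hxv : (([x] : List α).filter (fun y => key y == v)) = [] := by
        simp [hv]
      rw [hxv, List.append_nil, ih (List.pairwise_cons.mp hS).2 hxS']

-- stable reverse sort = descending bucket concatenation
lemma sorted_rev_flatMap {α : Type} (key : α → Int) (S : List Int)
    (hS : S.Pairwise (fun a b => b < a)) (xs : List α)
    (hmem : ∀ y ∈ xs, key y ∈ S) :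
    PySem.List.sorted xs key true = S.flatMap (fun v => xs.filter (fun y => key y == v)) := by
  rw [PySem.List.sorted_rev_eq_foldl_insertBy]
  induction xs using List.reverseRecOn with
  | nil => simp
  | append_singleton xs x ih =>
    rw [List.foldl_append]
    simp only [List.foldl_cons, List.foldl_nil]
    rw [ih (fun y hy => hmem y (by simp [hy]))]
    exact ins_flatMap key x S hS (hmem x (by simp)) xs

-- the bucket fold builds exactly the per-score filters
lemma bucket_fold (f : String → Nat) (hf : ∀ s, f s < 19) (sentences : List String) :
    sentences.foldl (fun bs s => bucketAdd bs (f s) s) (List.replicate 19 [])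
      = (List.range 19).map (fun i => sentences.filter (fun s => f s == i)) := by
  induction sentences using List.reverseRecOn with
  | nil =>
    apply List.ext_getElem (by simp)
    intro j h1 h2; simp
  | append_singleton xs x ih =>
    rw [List.foldl_append]
    simp only [List.foldl_cons, List.foldl_nil]
    rw [ih]
    unfold bucketAdd
    apply List.ext_getElem (by simp)
    intro j h1 h2
    simp only [List.length_set, List.length_map, List.length_range] at h1 h2
    have hlen : ((List.range 19).map (fun i => xs.filter (fun s => f s == i))).length = 19 := by simp
    have hfx : f x < 19 := hf x
    have hget : ((List.range 19).map (fun i => xs.filter (fun s => f s == i))).getD (f x) []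
        = xs.filter (fun s => f s == f x) := by
      rw [List.getD_eq_getElem _ _ (by simpa [hlen] using hfx)]
      simp
    simp only [List.getElem_set]
    simp only [hget]
    simp only [List.getElem_map, List.getElem_range, List.filter_append]
    by_cases h : f x = j
    · simp [h]
    · simp [h]

-- score bounds
lemma ctxScore_nonneg (s : String) (kws : List String) : 0 ≤ ctxScore s kws := by
  unfold ctxScore
  split_ifs <;> positivity

lemma ctxScore_lt (s : String) (kws : List String) : ctxScore s kws < 19 := by
  unfold ctxScore
  have h1 : (ctxIndicatorsB.countP (fun ind => PySem.Str.isIn ind (PySem.Str.lower s))) ≤ 6 := by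
    have := List.countP_le_length (l := ctxIndicatorsB)
      (p := fun ind => PySem.Str.isIn ind (PySem.Str.lower s))
    simpa [ctxIndicatorsB] using this
  have h2 : ((PySem.List.slice kws none (some 5)).countP
      (fun kw => PySem.Str.isIn (PySem.Str.lower kw) (PySem.Str.lower s))) ≤ 5 := by
    have hl : (PySem.List.slice kws none (some 5)).length ≤ 5 := by
      rw [PySem.List.slice_to kws (by norm_num)]
      simpa using List.length_take_le 5 kws
    exact le_trans (List.countP_le_length) hl
  split_ifs <;> push_cast <;> omega

-- slice commutes with map (slice looks only at the length)
lemma slice_map {α β : Type} (g : α → β) (xs : List α) (a b : Option Int) :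
    PySem.List.slice (xs.map g) a b = (PySem.List.slice xs a b).map g := by
  simp [PySem.List.slice, List.map_take, List.map_drop]

-- ===== VERDICT (by name: the statement is the Claim_ definition above) =====
theorem select_contextual_sentences_py_spec : Claim_equal_select_contextual_sentences_py := by
  intro sentences keywords count _dom
  unfold Spec_select_contextual_sentences_py
  unfold select_contextual_sentences_py select_contextual_sentences_py_alt
  simp only []
  -- A side: the append loop is a map, with B's ctxScore as the score
  rw [PySem.List.foldl_append_singleton_eq_map
        (f := fun sentence => (sentence,
          if 15 ≤ (PySem.Str.split₀ sentence).length ∧ (PySem.Str.split₀ sentence).length ≤ 40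
          then (PySem.List.slice keywords none (some 5)).foldl
                (fun sc keyword => if PySem.Str.isIn (PySem.Str.lower keyword) (PySem.Str.lower sentence) then sc + 1 else sc)
                (ctxIndicators.foldl
                  (fun sc indicator => if PySem.Str.isIn indicator (PySem.Str.lower sentence) then sc + 2 else sc) 0) + 1
          else (PySem.List.slice keywords none (some 5)).foldl
                (fun sc keyword => if PySem.Str.isIn (PySem.Str.lower keyword) (PySem.Str.lower sentence) then sc + 1 else sc)
                (ctxIndicators.foldl
                  (fun sc indicator => if PySem.Str.isIn indicator (PySem.Str.lower sentence) then sc + 2 else sc) 0)))]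
  simp only [score_eq, List.nil_append]
  -- the descending list of possible scores
  have hS : (List.map (fun i : Nat => (i : Int)) ((List.range 19).reverse)).Pairwise (fun a b => b < a) := by
    have h0 : (List.range 19).Pairwise (fun a b => a < b) := List.pairwise_lt_range
    have h1 : ((List.range 19).reverse).Pairwise (fun a b : Nat => b < a) :=
      List.pairwise_reverse.mpr h0
    exact List.Pairwise.map (fun i : Nat => (i : Int)) (fun a b h => by simpa using (Nat.cast_lt (α := Int)).mpr h) h1
  have hmem : ∀ p ∈ sentences.map (fun s => (s, ctxScore s keywords)),
      (fun q : String × Int => q.2) p ∈ List.map (fun i : Nat => (i : Int)) ((List.range 19).reverse) := by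
    intro p hp
    rcases List.mem_map.mp hp with ⟨s, _, rfl⟩
    simp only [List.mem_map, List.mem_reverse, List.mem_range]
    refine ⟨(ctxScore s keywords).toNat, ?_, Int.toNat_of_nonneg (ctxScore_nonneg s keywords)⟩
    have h1 := ctxScore_nonneg s keywords
    have h2 := ctxScore_lt s keywords
    show (ctxScore s keywords).toNat < 19
    omega
  rw [sorted_rev_flatMap (fun q : String × Int => q.2) _ hS _ hmem]
  -- B side: buckets are the per-score filters
  rw [bucket_fold (fun s => (ctxScore s keywords).toNat)
        (fun s => by
          show (ctxScore s keywords).toNat < 19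
          have h1 := ctxScore_nonneg s keywords; have h2 := ctxScore_lt s keywords; omega)]
  rw [PySem.List.foldl_append_eq_flatten, List.nil_append]
  rw [← List.map_reverse, ← List.flatMap_def, List.flatMap_map]
  -- align the two bucket concatenations
  have hbkts : ((List.range 19).reverse).flatMap
        (fun a : Nat => (sentences.map (fun s => (s, ctxScore s keywords))).filter (fun y => y.2 == (a : Int)))
      = ((List.range 19).reverse).flatMap
          (fun i => (sentences.filter (fun s => (ctxScore s keywords).toNat == i)).map
            (fun s => (s, ctxScore s keywords))) := by
    apply List.flatMap_congr
    intro i _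
    rw [List.filter_map]
    congr 1
    apply List.filter_congr
    intro s _
    have h0 := ctxScore_nonneg s keywords
    simp only [Function.comp]
    by_cases h : ctxScore s keywords = (i : Int)
    · simp [h]
    · have hne : (ctxScore s keywords).toNat ≠ i := by omega
      simp [h, hne]
  rw [hbkts]
  rw [← List.map_flatMap, slice_map, List.map_map]
  simp [Function.comp_def]
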